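-- pv_equiv track=rewrite | github.com/tlhr/pepper.py | pepper.py | pepcut
-- ===== SOURCE A (Python) =====
-- def pepcut(seqlist, n=3):
--     """
--     Cuts amino acids from the sequence string.
--
--     Parameters
--     ----------
--     seqlist : list
--         List of one letter code sequence strings
--     n : int (default=3)
--         Number of amino acids to cut from the sequence
--
--     Returns
--     -------
--     seqlist : list
--         List of all possible permutations
--
--     """
--     if n == 0:
--         return seqlist
--     else:
--         plist = []
--         for seq in seqlist:
--             for i, _ in enumerate(seq):
--                 plist.append(seq[:i] + seq[i+1:])
--         return pepcut(plist, n-1) + seqlist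
-- ===== SOURCE B (Python) =====
-- def pepcut(seqlist, n=3):
--     levels = [seqlist]
--     cur = seqlist
--     for _ in range(n):
--         cur = [s[:i] + s[i + 1:] for s in cur for i in range(len(s))]
--         levels.append(cur)
--     out = []
--     for lvl in reversed(levels):
--         out.extend(lvl)
--     return out
-- ===== Notes on version B (the rewrite author's own statement) =====
-- stated objective: alternative
-- what changed: Replaced the n-deep recursion (recurse on the cut list, then '+' the result) by an iterative loop that collects the successive cut levels in a list and concatenates them back-to-front with extend, avoiding A's repeated full-list copies.
import Mathlib
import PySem

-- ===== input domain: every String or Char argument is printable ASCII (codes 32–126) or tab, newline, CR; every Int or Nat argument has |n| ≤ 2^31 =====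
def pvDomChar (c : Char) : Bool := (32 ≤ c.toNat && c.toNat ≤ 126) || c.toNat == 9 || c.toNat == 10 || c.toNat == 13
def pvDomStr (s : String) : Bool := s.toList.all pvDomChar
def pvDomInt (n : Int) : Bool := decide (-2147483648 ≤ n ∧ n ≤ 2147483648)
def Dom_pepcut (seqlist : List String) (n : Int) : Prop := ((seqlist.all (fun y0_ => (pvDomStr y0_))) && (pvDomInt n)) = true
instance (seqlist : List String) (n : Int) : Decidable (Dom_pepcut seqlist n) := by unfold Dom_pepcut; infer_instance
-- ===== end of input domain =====

-- B replaces A's n-deep recursion by an iterative loop collecting the cut levels, concatenated back-to-front; alternative decomposition.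

-- ===== PORT A =====
-- the inner double loop of A: for seq in seqlist: for i,_ in enumerate(seq): plist.append(seq[:i]+seq[i+1:])
-- (seq[:i] and seq[i+1:] with 0 ≤ i are exactly take i / drop (i+1))
def pepcutCut (seqlist : List String) : List String :=
  seqlist.foldl (fun plist seq =>
    plist ++ (List.range seq.toList.length).map
      (fun i => String.mk (seq.toList.take i ++ seq.toList.drop (i + 1)))) []

-- the recursion of A, on the value of n (n ≥ 0 by Pre_; for n < 0 Python A never returns)
def pepcutGo (seqlist : List String) : Nat → List String
  | 0 => seqlist
  | k + 1 => pepcutGo (pepcutCut seqlist) k ++ seqlist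

def pepcut (seqlist : List String) (n : Int) : List String :=
  pepcutGo seqlist n.toNat

-- ===== PORT B =====
-- the list comprehension of B
def pepcutLevel (cur : List String) : List String :=
  cur.flatMap fun s => (List.range s.toList.length).map
    fun i => String.mk (s.toList.take i ++ s.toList.drop (i + 1))

-- B's loop: collect the successive levels, then concatenate them back-to-front
def pepcut_alt (seqlist : List String) (n : Int) : List String :=
  let st := (List.range n.toNat).foldl
    (fun (st : List (List String) × List String) _ =>
      (st.1 ++ [pepcutLevel st.2], pepcutLevel st.2))
    ([seqlist], seqlist)
  st.1.reverse.foldl (fun out lvl => out ++ lvl) []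

-- ===== PRECONDITION & SPEC =====
-- Pre_ excludes n < 0, on which Python A recurses forever (RecursionError) and returns no value.
def Pre_pepcut (seqlist : List String) (n : Int) : Prop := 0 ≤ n
instance (seqlist : List String) (n : Int) : Decidable (Pre_pepcut seqlist n) := by unfold Pre_pepcut; infer_instance
def pvWitness_pepcut : List String × Int := (["ab", "c"], 2)

def Spec_pepcut (seqlist : List String) (n : Int) (out : List String) : Prop := out = pepcut_alt seqlist n
instance (seqlist : List String) (n : Int) (out : List String) : Decidable (Spec_pepcut seqlist n out) := by unfold Spec_pepcut; infer_instance

-- ===== CLAIM (what is proved, stated in full; the proofs are below) =====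
def Claim_equal_pepcut : Prop := ∀ (seqlist : List String) (n : Int), Dom_pepcut seqlist n → Pre_pepcut seqlist n → Spec_pepcut seqlist n (pepcut seqlist n)

-- ===== LEMMAS AND PROOFS =====

theorem foldl_app (f : String → List String) (a : List String) (l : List String) :
    l.foldl (fun p s => p ++ f s) a = a ++ l.flatMap f := by
  induction l generalizing a with
  | nil => simp
  | cons x xs ih => simp [List.foldl, ih, List.flatMap_cons, List.append_assoc]

theorem cut_eq_level (l : List String) : pepcutCut l = pepcutLevel l := by
  simpa [pepcutCut, pepcutLevel] using
    foldl_app (fun s => (List.range s.toList.length).map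
      (fun i => String.mk (s.toList.take i ++ s.toList.drop (i + 1)))) [] l

-- A's recursion, re-decomposed: peel the OUTER level instead of the inner one
theorem go_succ (s : List String) (k : Nat) :
    pepcutGo s (k + 1) = pepcutLevel^[k + 1] s ++ pepcutGo s k := by
  induction k generalizing s with
  | zero => simp [pepcutGo, cut_eq_level]
  | succ m ih =>
      calc pepcutGo s (m + 2) = pepcutGo (pepcutCut s) (m + 1) ++ s := rfl
        _ = pepcutLevel^[m + 1] (pepcutCut s) ++ pepcutGo (pepcutCut s) m ++ s := by
              rw [ih]
        _ = pepcutLevel^[m + 2] s ++ pepcutGo s (m + 1) := by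
              have h1 : pepcutLevel^[m + 1] (pepcutCut s) = pepcutLevel^[m + 2] s := by
                rw [cut_eq_level, ← Function.iterate_succ_apply]
              have h2 : pepcutGo (pepcutCut s) m ++ s = pepcutGo s (m + 1) := rfl
              rw [List.append_assoc, h1, h2]

theorem flat_aux (R : List (List String)) (acc : List String) :
    R.foldl (fun out lvl => out ++ lvl) acc = acc ++ R.flatten := by
  induction R generalizing acc with
  | nil => simp
  | cons x xs ih => simp [List.foldl, ih, List.append_assoc]

theorem levels_inv (s : List String) (m : Nat) :
    (List.range m).foldl
      (fun (st : List (List String) × List String) (_ : Nat) =>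
        (st.1 ++ [pepcutLevel st.2], pepcutLevel st.2))
      ([s], s)
      = ((List.range (m + 1)).map (fun i => pepcutLevel^[i] s), pepcutLevel^[m] s) := by
  induction m with
  | zero => simp
  | succ k ih =>
      rw [List.range_succ, List.foldl_append, ih]
      rw [List.range_succ (n := k + 1), List.map_append]
      simp [Function.iterate_succ_apply']

theorem rev_flat (s : List String) (m : Nat) :
    (((List.range (m + 1)).map (fun i => pepcutLevel^[i] s)).reverse).flatten
      = pepcutGo s m := by
  induction m with
  | zero => simp [pepcutGo]
  | succ k ih =>
      rw [List.range_succ (n := k + 1), List.map_append, List.reverse_append]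
      simp only [List.map_cons, List.map_nil, List.reverse_cons, List.reverse_nil,
        List.nil_append, List.cons_append, List.flatten_cons, ih]
      exact (go_succ s k).symm

-- ===== VERDICT (by name: the statement is the Claim_ definition above) =====
theorem pepcut_spec : Claim_equal_pepcut := by
  intro seqlist n _ _
  unfold Spec_pepcut pepcut pepcut_alt
  rw [levels_inv, flat_aux, List.nil_append, rev_flat]
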